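-- pv_equiv track=rewrite | github.com/amazon-science/intent-aware-encoder | pretraining/preprocess/irl/utils.py | labels_to_spans
-- ===== SOURCE A (Python) =====
-- from typing import List, Tuple, Iterable
--
-- class BioesConfig:
--     BEGIN = "B"
--     BEGIN_ = "B-"
--     END = "E"
--     END_ = "E-"
--     SINGLE = "S"
--     SINGLE_ = "S-"
--     IN = "I"
--     IN_ = "I-"
--     OUT = "O"
--     DELIM = "-"
--
-- def labels_to_spans(labeling: Iterable[str]) -> List[Tuple[str, int, int]]:
--     """
--     Given an IOB/BESIO chunking produce a list of labeled spans--triples of (label, start index,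
--     end index exclusive).
--     >>> labels_to_spans(['O', 'B-PER', 'I-PER', 'O', 'B-ORG'])
--     [('PER', 1, 3), ('ORG', 4, 5)]
--
--     :param labeling: list of IOB/BESIO labels
--     :return: list of spans
--     """
--
--     def _start_of_chunk(curr):
--         curr_tag, _ = _get_val_and_tag(curr)
--         return curr_tag in {BioesConfig.SINGLE, BioesConfig.BEGIN}
--
--     def _end_of_chunk(curr):
--         curr_tag, _ = _get_val_and_tag(curr)
--         return curr_tag in {BioesConfig.END, BioesConfig.SINGLE}
--
--     besio = chunk(labeling, besio=True)
--
--     result = []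
--     curr_label, start = None, None
--     for index, label in enumerate(besio):
--         if _start_of_chunk(label):
--             if curr_label:
--                 result.append((curr_label, start, index))
--             curr_label, start = _get_val_and_tag(label)[1], index
--         if _end_of_chunk(label):
--             result.append((curr_label, start, index + 1))
--             curr_label = None
--     if curr_label:
--         result.append((curr_label, start, len(besio)))
--
--     return result
--
-- def chunk(labeling: Iterable[str], besio=False) -> List[str]:
--     """
--     Convert an IO/BIO/BESIO-formatted sequence of labels to BIO, BESIO, or CoNLL-2005 formatted.
--     :param labeling: original labels
--     :param besio: (optional) convert to BESIO format, `False` by default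
--     :return: converted labels
--     """
--     result = []
--     prev_type = None
--     curr = []
--     for label in labeling:
--         if label == BioesConfig.OUT:
--             state, chunk_type = BioesConfig.OUT, ''
--         else:
--             split_index = label.index(BioesConfig.DELIM)
--             state, chunk_type = label[:split_index], label[split_index + 1:]
--         if state == BioesConfig.IN and chunk_type != prev_type:  # new chunk of different type
--             state = BioesConfig.BEGIN
--         if state in [BioesConfig.BEGIN, BioesConfig.OUT] and curr:  # end of chunk
--             result += _to_besio(curr) if besio else curr
--             curr = []
--         if state == BioesConfig.OUT:
--             result.append(state)
--         else:
--             curr.append(state + BioesConfig.DELIM + chunk_type)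
--         prev_type = chunk_type
--     if curr:
--         result += _to_besio(curr) if besio else curr
--     return result
--
-- def _to_besio(iob_labeling):
--     if len(iob_labeling) == 1:
--         return [BioesConfig.SINGLE + iob_labeling[0][1:]]
--     return iob_labeling[:-1] + [BioesConfig.END + iob_labeling[-1][1:]]
--
-- def _get_val_and_tag(label):
--     if not label:
--         return '', ''
--     if label == BioesConfig.OUT:
--         return label, ''
--     return label.split(BioesConfig.DELIM, 1)
-- ===== SOURCE B (Python) =====
-- def labels_to_spans(labeling):
--     """Single pass over the labels: each label is parsed once and spans are
--     emitted directly through a one-element pending buffer (a label is resolved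
--     as chunk-interior or chunk-end once its successor is seen), with no
--     intermediate BESIO label list."""
--     labels = list(labeling)
--     result = []
--     open_label, open_start = None, None
--     prev_type = None
--     pending = None  # (state, type, starts_group, index)
--
--     def parse(label):
--         if label == 'O':
--             return 'O', ''
--         i = label.index('-')
--         return label[:i], label[i + 1:]
--
--     def emit(p, is_last):
--         nonlocal open_label, open_start
--         state, ctype, is_start, idx = p
--         if state == 'O':
--             return
--         # the last label of a group carries the closing tag: S when it also
--         # opened the group, E otherwise (BESIO retags the first letter)
--         tag = (('S' if is_start else 'E') + state[1:]) if is_last else state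
--         if tag in ('S', 'B'):
--             if open_label:
--                 result.append((open_label, open_start, idx))
--             open_label, open_start = ctype, idx
--         if tag in ('E', 'S'):
--             result.append((open_label, open_start, idx + 1))
--             open_label = None
--
--     for index, label in enumerate(labels):
--         state, ctype = parse(label)
--         if state == 'I' and ctype != prev_type:
--             state = 'B'
--         if pending is not None:
--             emit(pending, state in ('O', 'B'))
--         in_group = pending is not None and pending[0] != 'O' and state not in ('O', 'B')
--         is_start = state != 'O' and not in_group
--         pending = (state, ctype, is_start, index)
--         prev_type = ctype
--     if pending is not None:
--         emit(pending, True)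
--     if open_label:
--         result.append((open_label, open_start, len(labels)))
--     return result
-- ===== Notes on version B (the rewrite author's own statement) =====
-- stated objective: alternative
-- what changed: Replaces A's two-phase pipeline (chunk() building an intermediate BESIO label list via a buffered group that _to_besio retro-edits, then a second enumerate scan over that list) by a single pass that parses each label once and emits spans directly, resolving each label as chunk-interior or chunk-end through a one-element pending buffer when its successor is seen; Pre_ excludes malformed labelings (dash-less non-O labels that raise ValueError, an E tag with no open chunk that makes A emit None-labeled tuples, and labels with an empty tag part, where both behaviours are defensible).
-- outside the precondition, e.g. on labels_to_spans(['O', 'I-', 'I-']): A returns [(None, None, 3)], B returns [(None, None, 3)]; on labels_to_spans(['-a-b']): A returns [], B returns [('a-b', 0, 1)]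
import Mathlib
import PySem

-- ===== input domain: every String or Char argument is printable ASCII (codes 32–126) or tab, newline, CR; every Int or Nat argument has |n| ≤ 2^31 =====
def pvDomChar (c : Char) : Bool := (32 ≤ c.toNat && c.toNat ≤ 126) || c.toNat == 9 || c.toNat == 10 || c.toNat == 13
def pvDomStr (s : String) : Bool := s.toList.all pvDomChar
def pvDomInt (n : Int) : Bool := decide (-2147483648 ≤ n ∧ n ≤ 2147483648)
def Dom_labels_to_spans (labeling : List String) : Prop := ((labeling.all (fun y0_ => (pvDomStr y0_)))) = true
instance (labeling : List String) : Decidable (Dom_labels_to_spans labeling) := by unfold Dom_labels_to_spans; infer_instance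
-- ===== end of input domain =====

-- B replaces A's two-phase pipeline (IOB→BESIO list, then a second scan over that list)
-- by one pass that resolves each label once its successor is seen and emits spans directly.

-- shared low-level helper: label.index('-') plus the two slices label[:i], label[i+1:]
-- (exact: first '-' occurrence; none = Python ValueError from .index)
def splitDash : List Char → Option (List Char × List Char)
  | [] => none
  | ch :: rest =>
    if ch = '-' then some ([], rest)
    else match splitDash rest with
      | none => none
      | some (a, b) => some (ch :: a, b)

-- parsing of one raw label: 'O' → (O, ''), else split at first '-'
def parseLab (l : List Char) : Option (List Char × List Char) :=
  if l = ['O'] then some (['O'], []) else splitDash l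

-- state + '-' + chunk_type
def renderLab (s c : List Char) : List Char := s ++ '-' :: c

-- Python truthiness of the Optional[str] curr_label (None and '' are falsy)
def truthy : Option (List Char) → Bool
  | some (_ :: _) => true
  | _ => false

-- ===== PORT A =====
-- _to_besio
def toBesio (iob : List (List Char)) : List (List Char) :=
  match iob with
  | [x] => ['S' :: x.drop 1]
  | xs => xs.dropLast ++ ['E' :: (xs.getLastD []).drop 1]

-- chunk(labeling, besio=True): loop state (prev_type, curr, result); none = ValueError
def chunkGoA : List (List Char) → Option (List Char) → List (List Char) → List (List Char) →
    Option (List (List Char))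
  | [], _, curr, res => some (if curr = [] then res else res ++ toBesio curr)
  | l :: rest, prev, curr, res =>
    match parseLab l with
    | none => none   -- label.index(DELIM) raises ValueError
    | some (s, c) =>
      let s1 := if s = ['I'] ∧ prev ≠ some c then ['B'] else s
      let res1 := if (s1 = ['B'] ∨ s1 = ['O']) ∧ curr ≠ [] then res ++ toBesio curr else res
      let curr1 := if (s1 = ['B'] ∨ s1 = ['O']) ∧ curr ≠ [] then ([] : List (List Char)) else curr
      if s1 = ['O'] then chunkGoA rest (some c) curr1 (res1 ++ [['O']])
      else chunkGoA rest (some c) (curr1 ++ [renderLab s1 c]) res1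

-- _get_val_and_tag (none = ValueError from unpacking a dash-less split)
def getValTag (l : List Char) : Option (List Char × List Char) :=
  if l = [] then some ([], [])
  else if l = ['O'] then some (['O'], [])
  else splitDash l

-- the enumerate loop over besio plus the final 'if curr_label' flush
def spanGoA : List (List Char) → Int → Option (List Char) → Int →
    List (List Char × Int × Int) → Option (List (List Char × Int × Int))
  | [], i, cl, st, res => some (if truthy cl then res ++ [(cl.getD [], st, i)] else res)
  | l :: rest, i, cl, st, res =>
    match getValTag l with
    | none => none
    | some (tag, typ) =>
      let res1 := if tag = ['S'] ∨ tag = ['B'] then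
          (if truthy cl then res ++ [(cl.getD [], st, i)] else res) else res
      let cl1 := if tag = ['S'] ∨ tag = ['B'] then some typ else cl
      let st1 := if tag = ['S'] ∨ tag = ['B'] then i else st
      if tag = ['E'] ∨ tag = ['S'] then
        match cl1 with
        | none => none   -- Python appends (None, …): not a value of the result type (outside Pre_)
        | some v => spanGoA rest (i + 1) none st1 (res1 ++ [(v, st1, i + 1)])
      else spanGoA rest (i + 1) cl1 st1 res1

def labels_to_spans (labeling : List String) : List (String × Int × Int) :=
  match chunkGoA (labeling.map String.toList) none [] [] with
  | none => []     -- Python raises ValueError here (outside Pre_)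
  | some besio =>
    match spanGoA besio 0 none 0 [] with
    | none => []   -- Python raises / returns None-tuples here (outside Pre_)
    | some spans => spans.map fun x => (String.ofList x.1, x.2.1, x.2.2)

-- ===== PORT B =====
-- Source B's emit(p, is_last): resolve the pending label and run the span machine one step;
-- the last label of a group carries the closing tag 'S'/'E' in place of its first letter
def emitPendB (s c : List Char) (isStart isLast : Bool) (idx : Int)
    (op : Option (List Char)) (ost : Int) (res : List (List Char × Int × Int)) :
    Option (Option (List Char) × Int × List (List Char × Int × Int)) :=
  if s = ['O'] then some (op, ost, res)
  else
    let tag := if isLast then (if isStart then 'S' else 'E') :: s.drop 1 else s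
    let res1 := if tag = ['S'] ∨ tag = ['B'] then
        (if truthy op then res ++ [(op.getD [], ost, idx)] else res) else res
    let o1 := if tag = ['S'] ∨ tag = ['B'] then some c else op
    let st1 := if tag = ['S'] ∨ tag = ['B'] then idx else ost
    if tag = ['E'] ∨ tag = ['S'] then
      match o1 with
      | none => none   -- Python appends (None, …): not a value of the result type (outside Pre_)
      | some v => some (none, st1, res1 ++ [(v, st1, idx + 1)])
    else some (o1, st1, res1)

-- Source B's main loop: state (prev_type, pending, index, open_label, open_start, result)
def spanGoB : List (List Char) → Option (List Char) → Option (List Char × List Char × Bool × Int) →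
    Int → Option (List Char) → Int → List (List Char × Int × Int) →
    Option (List (List Char × Int × Int))
  | [], _, pending, i, op, ost, res =>
    match pending with
    | none => some (if truthy op then res ++ [(op.getD [], ost, i)] else res)
    | some (ps, pc, pst, pidx) =>
      match emitPendB ps pc pst true pidx op ost res with
      | none => none
      | some (o1, s1, r1) => some (if truthy o1 then r1 ++ [(o1.getD [], s1, i)] else r1)
  | l :: rest, prev, pending, i, op, ost, res =>
    match parseLab l with
    | none => none   -- label.index(DELIM) raises ValueError
    | some (s0, c) =>
      let s := if s0 = ['I'] ∧ prev ≠ some c then ['B'] else s0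
      let ended : Bool := s = ['O'] ∨ s = ['B']
      match (match pending with
             | none => some (op, ost, res)
             | some (ps, pc, pst, pidx) => emitPendB ps pc pst ended pidx op ost res) with
      | none => none
      | some (o1, st1, r1) =>
        let inGroup : Bool := (match pending with
                               | some (ps, _, _, _) => ps ≠ ['O']
                               | none => false) && !ended
        let isStart : Bool := (s ≠ ['O'] : Bool) && !inGroup
        spanGoB rest (some c) (some (s, c, isStart, i)) (i + 1) o1 st1 r1

def labels_to_spans_alt (labeling : List String) : List (String × Int × Int) :=
  match spanGoB (labeling.map String.toList) none none 0 none 0 [] with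
  | none => []     -- Python raises / returns None-tuples here (outside Pre_)
  | some spans => spans.map fun x => (String.ofList x.1, x.2.1, x.2.2)

-- ===== PRECONDITION & SPEC =====
-- index-wise description of the BESIO tag the chunking assigns to position i
def rawAt (labs : List (List Char)) (i : Nat) : List Char × List Char :=
  (parseLab (labs.getD i [])).getD ([], [])

def adjStateAt (labs : List (List Char)) (i : Nat) : List Char :=
  if (rawAt labs i).1 = ['I'] ∧ (i = 0 ∨ (rawAt labs (i - 1)).2 ≠ (rawAt labs i).2) then ['B']
  else (rawAt labs i).1

def groupStartB (labs : List (List Char)) (i : Nat) : Bool :=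
  adjStateAt labs i ≠ ['O'] &&
    (i == 0 || adjStateAt labs (i - 1) == ['O'] || adjStateAt labs i == ['B'])

def groupEndB (labs : List (List Char)) (i : Nat) : Bool :=
  adjStateAt labs i ≠ ['O'] &&
    (i == labs.length - 1 || adjStateAt labs (i + 1) == ['O'] || adjStateAt labs (i + 1) == ['B'])

def tagAt (labs : List (List Char)) (i : Nat) : Option (List Char) :=
  if adjStateAt labs i = ['O'] then some ['O']
  else if groupEndB labs i then
    (splitDash ((if groupStartB labs i then 'S' else 'E') ::
       (renderLab (adjStateAt labs i) (rawAt labs i).2).drop 1)).map (·.1)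
  else some (adjStateAt labs i)

-- Pre_ excludes exactly the malformed labelings on which A's outcome is an accident of its
-- two-phase pipeline rather than a span list anyone would specify: dash-less non-'O' labels
-- raise ValueError, an 'E' tag reached with no open chunk makes A append tuples containing
-- None (not values of the declared type), a chunk-end tag whose retagged label has no dash
-- raises ValueError in the span scan, and a non-'O' label with an EMPTY tag part (leading
-- '-') makes A re-split its synthesised retagged label at a dash inside the type — on such
-- malformed labels A's and B's values are both defensible and neither is specified.
-- a 'B' tag opens a chunk before position i and no 'E'/'S' tag closes it again
def openBefore (labs : List (List Char)) (i : Nat) : Bool :=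
  (List.range i).any fun j => tagAt labs j == some ['B'] &&
    ((List.range i).all fun m => m ≤ j || (tagAt labs m != some ['E'] && tagAt labs m != some ['S']))

def Pre_labels_to_spans (labeling : List String) : Prop :=
  (∀ l ∈ labeling, l = "O" ∨ '-' ∈ l.toList) ∧
  (∀ l ∈ labeling, l.toList.head? ≠ some '-') ∧
  (∀ i < (labeling.map String.toList).length, tagAt (labeling.map String.toList) i ≠ none) ∧
  (∀ i < (labeling.map String.toList).length,
     tagAt (labeling.map String.toList) i = some ['E'] →
     openBefore (labeling.map String.toList) i = true)
instance (labeling : List String) : Decidable (Pre_labels_to_spans labeling) := by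
  unfold Pre_labels_to_spans; infer_instance

def pvWitness_labels_to_spans : List String := ["O", "B-PER", "I-PER", "O", "B-ORG"]

def Spec_labels_to_spans (labeling : List String) (out : List (String × Int × Int)) : Prop :=
  out = labels_to_spans_alt labeling
instance (labeling : List String) (out : List (String × Int × Int)) :
    Decidable (Spec_labels_to_spans labeling out) := by unfold Spec_labels_to_spans; infer_instance

-- ===== CLAIM (what is proved, stated in full; the proofs are below) =====
def Claim_equal_labels_to_spans : Prop := ∀ (labeling : List String),
  Dom_labels_to_spans labeling → Pre_labels_to_spans labeling →
  Spec_labels_to_spans labeling (labels_to_spans labeling)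

-- ===== LEMMAS AND PROOFS =====

-- A's span-pass state: (index, curr_label, start, result)
def pvFlush (i : Int) (cl : Option (List Char)) (st : Int)
    (res : List (List Char × Int × Int)) : List (List Char × Int × Int) :=
  if truthy cl then res ++ [(cl.getD [], st, i)] else res

-- A's enumerate loop without its final flush
def pvRunA : List (List Char) → Int → Option (List Char) → Int →
    List (List Char × Int × Int) →
    Option (Int × Option (List Char) × Int × List (List Char × Int × Int))
  | [], i, cl, st, res => some (i, cl, st, res)
  | l :: rest, i, cl, st, res =>
    match getValTag l with
    | none => none
    | some (tag, typ) =>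
      let res1 := if tag = ['S'] ∨ tag = ['B'] then
          (if truthy cl then res ++ [(cl.getD [], st, i)] else res) else res
      let cl1 := if tag = ['S'] ∨ tag = ['B'] then some typ else cl
      let st1 := if tag = ['S'] ∨ tag = ['B'] then i else st
      if tag = ['E'] ∨ tag = ['S'] then
        match cl1 with
        | none => none
        | some v => pvRunA rest (i + 1) none st1 (res1 ++ [(v, st1, i + 1)])
      else pvRunA rest (i + 1) cl1 st1 res1

lemma spanGoA_eq_runA (l : List (List Char)) : ∀ i cl st res,
    spanGoA l i cl st res =
      (pvRunA l i cl st res).map fun q => pvFlush q.1 q.2.1 q.2.2.1 q.2.2.2 := by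
  induction l with
  | nil => intro i cl st res; simp [spanGoA, pvRunA, pvFlush]
  | cons x rest ih =>
    intro i cl st res
    simp only [spanGoA, pvRunA]
    cases hgv : getValTag x with
    | none => rfl
    | some p =>
      obtain ⟨tag, typ⟩ := p
      by_cases hSB : tag = ['S'] ∨ tag = ['B'] <;>
        by_cases hES : tag = ['E'] ∨ tag = ['S'] <;>
          simp only [if_pos, if_neg, hSB, hES, ite_true, ite_false] <;>
            first
              | (apply ih)
              | (cases cl <;> simp only [] <;> first | rfl | apply ih)

lemma pvRunA_append (a : List (List Char)) : ∀ b i cl st res,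
    pvRunA (a ++ b) i cl st res =
      match pvRunA a i cl st res with
      | none => none
      | some (i', cl', st', res') => pvRunA b i' cl' st' res' := by
  induction a with
  | nil => intro b i cl st res; rfl
  | cons x rest ih =>
    intro b i cl st res
    simp only [List.cons_append, pvRunA]
    cases hgv : getValTag x with
    | none => rfl
    | some p =>
      obtain ⟨tag, typ⟩ := p
      by_cases hSB : tag = ['S'] ∨ tag = ['B'] <;>
        by_cases hES : tag = ['E'] ∨ tag = ['S'] <;>
          simp only [if_pos, if_neg, hSB, hES, ite_true, ite_false] <;>
            first
              | (apply ih)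
              | (cases cl <;> simp only [] <;> first | rfl | apply ih)

lemma spanGoA_split (a b : List (List Char)) (i : Int) (cl : Option (List Char)) (st : Int)
    (res : List (List Char × Int × Int)) :
    spanGoA (a ++ b) i cl st res =
      match pvRunA a i cl st res with
      | none => none
      | some (i', cl', st', res') => spanGoA b i' cl' st' res' := by
  rw [spanGoA_eq_runA, pvRunA_append]
  cases pvRunA a i cl st res with
  | none => rfl
  | some q =>
    obtain ⟨i', cl', st', res'⟩ := q
    simpa using (spanGoA_eq_runA b i' cl' st' res').symm

lemma splitDash_state_nodash : ∀ l s c, splitDash l = some (s, c) → '-' ∉ s := by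
  intro l
  induction l with
  | nil => intro s c h; simp [splitDash] at h
  | cons x rest ih =>
    intro s c h
    by_cases hx : x = '-'
    · simp only [splitDash, if_pos hx, Option.some.injEq, Prod.mk.injEq] at h
      simp [← h.1]
    · simp only [splitDash, if_neg hx] at h
      cases hsp : splitDash rest with
      | none => rw [hsp] at h; simp at h
      | some p =>
        obtain ⟨a, b⟩ := p
        rw [hsp] at h; simp at h
        obtain ⟨h1, h2⟩ := h
        rw [← h1]
        intro hm
        rcases List.mem_cons.mp hm with h | h
        · exact hx h.symm
        · exact ih a b hsp h

lemma splitDash_render (s c : List Char) (h : '-' ∉ s) :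
    splitDash (renderLab s c) = some (s, c) := by
  induction s with
  | nil => simp [renderLab, splitDash]
  | cons x rest ih =>
    have hx : x ≠ '-' := fun hh => h (hh ▸ List.mem_cons_self)
    have hr : '-' ∉ rest := fun hh => h (List.mem_cons_of_mem _ hh)
    simp only [renderLab, List.cons_append, splitDash, if_neg hx]
    rw [show rest ++ '-' :: c = renderLab rest c from rfl, ih hr]

lemma renderLab_ne_O (s c : List Char) : renderLab s c ≠ ['O'] := by
  intro h
  have : '-' ∈ renderLab s c := by simp [renderLab]
  rw [h] at this
  simp at this

lemma getValTag_render (s c : List Char) (h : '-' ∉ s) :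
    getValTag (renderLab s c) = some (s, c) := by
  have hne : renderLab s c ≠ [] := by simp [renderLab]
  rw [getValTag, if_neg hne, if_neg (renderLab_ne_O s c), splitDash_render s c h]

lemma getValTag_cons (x : Char) (t : List Char) (h : x ≠ 'O') :
    getValTag (x :: t) = splitDash (x :: t) := by
  have h1 : (x :: t : List Char) ≠ [] := by simp
  have h2 : (x :: t : List Char) ≠ ['O'] := by
    intro hh; exact h (List.cons_eq_cons.mp hh).1
  rw [getValTag, if_neg h1, if_neg h2]

lemma toBesio_concat (a : List (List Char)) (x : List Char) (h : a ≠ []) :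
    toBesio (a ++ [x]) = a ++ [('E' :: x.drop 1)] := by
  match a with
  | [] => exact absurd rfl h
  | [y] => simp [toBesio]
  | y :: z :: t =>
    show toBesio (y :: z :: (t ++ [x])) = _
    simp only [toBesio]
    rw [show y :: z :: (t ++ [x]) = (y :: z :: t) ++ [x] by simp, List.dropLast_concat,
      List.getLastD_concat]

lemma pvRunA_single_raw (s c : List Char) (hnd : '-' ∉ s) (hO : s ≠ ['O']) (b : Bool)
    (i : Int) (cl : Option (List Char)) (st : Int) (res : List (List Char × Int × Int)) :
    pvRunA [renderLab s c] i cl st res =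
      (emitPendB s c b false i cl st res).map fun q => (i + 1, q.1, q.2.1, q.2.2) := by
  rcases eq_or_ne s ['S'] with hS | hS
  · subst hS; simp [pvRunA, emitPendB, getValTag_render _ c hnd]
  rcases eq_or_ne s ['B'] with hB | hB
  · subst hB; simp [pvRunA, emitPendB, getValTag_render _ c hnd]
  rcases eq_or_ne s ['E'] with hE | hE
  · subst hE
    simp only [pvRunA, emitPendB, getValTag_render _ c hnd, if_neg hO]
    cases cl <;> simp [pvRunA]
  · simp only [pvRunA, emitPendB, getValTag_render _ c hnd, if_neg hO]
    simp [hS, hB, hE, pvRunA]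

lemma pvRunA_single_edited (s c : List Char) (hO : s ≠ ['O']) (hne : s ≠ []) (hnd : '-' ∉ s)
    (isStart : Bool)
    (i : Int) (cl : Option (List Char)) (st : Int) (res : List (List Char × Int × Int)) :
    pvRunA [(if isStart then 'S' else 'E') :: (renderLab s c).drop 1] i cl st res =
      (emitPendB s c isStart true i cl st res).map fun q => (i + 1, q.1, q.2.1, q.2.2) := by
  obtain ⟨x, xs, rfl⟩ : ∃ x xs, s = x :: xs := by
    cases s with
    | nil => exact absurd rfl hne
    | cons a b => exact ⟨a, b, rfl⟩
  have hx : (if isStart then 'S' else 'E') ≠ 'O' := by cases isStart <;> simp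
  have hxd : ¬((if isStart then 'S' else 'E') = '-') := by cases isStart <;> simp
  have hxs : '-' ∉ xs := fun h => hnd (List.mem_cons_of_mem _ h)
  have hdrop : (renderLab (x :: xs) c).drop 1 = renderLab xs c := by simp [renderLab]
  have hsp : splitDash ((if isStart then 'S' else 'E') :: renderLab xs c) =
      some ((if isStart then 'S' else 'E') :: xs, c) := by
    simp only [splitDash, if_neg hxd, splitDash_render xs c hxs]
  rw [hdrop]
  simp only [pvRunA, getValTag_cons _ _ hx, hsp, emitPendB, if_neg hO, List.drop_succ_cons,
    List.drop_zero]
  rcases eq_or_ne ((if isStart then 'S' else 'E') :: xs) ['S'] with hS | hS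
  · rw [hS]; simp [pvRunA]
  rcases eq_or_ne ((if isStart then 'S' else 'E') :: xs) ['B'] with hB | hB
  · rw [hB]; simp [pvRunA]
  rcases eq_or_ne ((if isStart then 'S' else 'E') :: xs) ['E'] with hE | hE
  · rw [hE]; cases cl <;> simp [pvRunA]
  · simp [hS, hB, hE, pvRunA]

lemma pvRunA_single_O (i : Int) (cl : Option (List Char)) (st : Int)
    (res : List (List Char × Int × Int)) :
    pvRunA [['O']] i cl st res = some (i + 1, cl, st, res) := by
  simp [pvRunA, getValTag]

lemma chunkGoA_acc : ∀ (ls : List (List Char)) (prev : Option (List Char))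
    (curr res : List (List Char)),
    chunkGoA ls prev curr res = (chunkGoA ls prev curr []).map fun out => res ++ out := by
  intro ls
  induction ls with
  | nil => intro prev curr res; by_cases h : curr = [] <;> simp [chunkGoA, h]
  | cons l rest ih =>
    intro prev curr res
    simp only [chunkGoA]
    cases parseLab l with
    | none => rfl
    | some p =>
      obtain ⟨s, c⟩ := p
      simp only [List.nil_append]
      by_cases hf : ((if s = ['I'] ∧ prev ≠ some c then ['B'] else s) = ['B'] ∨
          (if s = ['I'] ∧ prev ≠ some c then ['B'] else s) = ['O']) ∧ curr ≠ [] <;>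
        by_cases hO : (if s = ['I'] ∧ prev ≠ some c then ['B'] else s) = ['O'] <;>
          simp only [if_pos, if_neg, hf, hO, ite_true, ite_false] <;>
            (conv_lhs => rw [ih]) <;> (conv_rhs => rw [ih]) <;>
              (cases chunkGoA rest (some c) _ [] <;> (try simp [List.append_assoc]) <;>
                split_ifs <;> simp [List.append_assoc])

lemma dropLast_prefix_toBesio (curr : List (List Char)) : curr.dropLast <+: toBesio curr := by
  match curr with
  | [] => simp [toBesio]
  | [x] => simp [toBesio]
  | y :: z :: t =>
    show (y :: z :: t).dropLast <+: (y :: z :: t).dropLast ++ _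
    exact List.prefix_append _ _

lemma chunkGoA_prefix : ∀ (ls : List (List Char)) (prev : Option (List Char))
    (curr out : List (List Char)), chunkGoA ls prev curr [] = some out → curr.dropLast <+: out := by
  intro ls
  induction ls with
  | nil =>
    intro prev curr out h
    simp only [chunkGoA] at h
    by_cases hc : curr = []
    · subst hc; simp
    · rw [if_neg hc] at h
      cases h; exact dropLast_prefix_toBesio curr
  | cons l rest ih =>
    intro prev curr out h
    simp only [chunkGoA] at h
    cases hp : parseLab l with
    | none => rw [hp] at h; simp at h
    | some p =>
      obtain ⟨s, c⟩ := p
      rw [hp] at h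
      simp only [List.nil_append] at h
      by_cases hc : curr = []
      · subst hc; simp
      by_cases hf : ((if s = ['I'] ∧ prev ≠ some c then ['B'] else s) = ['B'] ∨
          (if s = ['I'] ∧ prev ≠ some c then ['B'] else s) = ['O']) ∧ curr ≠ []
      · rw [if_pos hf, if_pos hf] at h
        by_cases hO : (if s = ['I'] ∧ prev ≠ some c then ['B'] else s) = ['O'] <;>
          [rw [if_pos hO] at h; rw [if_neg hO] at h] <;>
            (rw [chunkGoA_acc] at h;
             cases hrest : chunkGoA rest (some c) _ [] <;> rw [hrest] at h <;> simp at h <;>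
               (rw [← h]; exact (dropLast_prefix_toBesio curr).trans (List.prefix_append _ _)))
      · rw [if_neg hf, if_neg hf] at h
        by_cases hO : (if s = ['I'] ∧ prev ≠ some c then ['B'] else s) = ['O']
        · exact absurd ⟨Or.inr hO, hc⟩ hf
        · rw [if_neg hO] at h
          have := ih _ _ _ h
          rw [List.dropLast_concat] at this
          exact (List.dropLast_prefix curr).trans this

-- parsing facts
lemma parseLab_nodash (l s0 c : List Char) (h : parseLab l = some (s0, c)) : '-' ∉ s0 := by
  unfold parseLab at h
  by_cases hl : l = ['O']
  · rw [if_pos hl] at h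
    simp at h
    simp [← h.1]
  · rw [if_neg hl] at h
    exact splitDash_state_nodash l s0 c h

-- a label not beginning with '-' never parses to an empty state
lemma parseLab_state_ne_nil (l s0 c : List Char) (h : parseLab l = some (s0, c))
    (hh : l.head? ≠ some '-') : s0 ≠ [] := by
  unfold parseLab at h
  by_cases hl : l = ['O']
  · rw [if_pos hl] at h
    simp at h
    simp [← h.1]
  · rw [if_neg hl] at h
    cases l with
    | nil => simp [splitDash] at h
    | cons x rest =>
      by_cases hx : x = '-'
      · subst hx; simp at hh
      · simp only [splitDash, if_neg hx] at h
        cases hsp : splitDash rest with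
        | none => rw [hsp] at h; simp at h
        | some p =>
          obtain ⟨a, b⟩ := p
          rw [hsp] at h
          simp at h
          obtain ⟨h1, -⟩ := h
          simp [← h1]

-- running A's span machine over one flushed BESIO group = the pending-emits B already did
lemma pvRunA_group (g2 : List (List Char × List Char)) (s2 c2 : List Char)
    (hok : ∀ p ∈ g2, '-' ∉ p.1)
    (iA : Int) (clA : Option (List Char)) (stA : Int) (resA : List (List Char × Int × Int))
    (opB : Option (List Char)) (ostB : Int) (resB : List (List Char × Int × Int))
    (hO2 : s2 ≠ ['O']) (hne2 : s2 ≠ []) (hnd2 : '-' ∉ s2)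
    (hrun : pvRunA (g2.map fun p => renderLab p.1 p.2) iA clA stA resA =
      some (iA + g2.length, opB, ostB, resB)) :
    pvRunA (toBesio ((g2 ++ [(s2, c2)]).map fun p => renderLab p.1 p.2)) iA clA stA resA =
      (emitPendB s2 c2 (decide (g2 = [])) true (iA + g2.length) opB ostB resB).map
        fun q => (iA + g2.length + 1, q.1, q.2.1, q.2.2) := by
  cases g2 with
  | nil =>
    simp only [pvRunA, List.map_nil, List.length_nil, Nat.cast_zero, add_zero,
      Option.some.injEq, Prod.mk.injEq] at hrun
    obtain ⟨-, h1, h2, h3⟩ := hrun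
    subst h1; subst h2; subst h3
    have := pvRunA_single_edited s2 c2 hO2 hne2 hnd2 true iA clA stA resA
    simp only [if_pos rfl] at this ⊢
    simpa [toBesio] using this
  | cons q qs =>
    have hne : (((q :: qs : List _).map fun p => renderLab p.1 p.2)) ≠ [] := by simp
    rw [List.map_append, List.map_singleton, toBesio_concat _ _ hne,
      pvRunA_append, hrun]
    have := pvRunA_single_edited s2 c2 hO2 hne2 hnd2 false (iA + (q :: qs : List _).length)
      opB ostB resB
    simp only [if_neg (by simp : ¬False)] at this
    simp only [show (decide ((q :: qs : List _) = [])) = false by simp, Bool.false_eq_true,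
      if_neg] at this ⊢
    simpa using this

-- appending one raw (interior) element to the group run
lemma pvRunA_snoc_raw (g2 : List (List Char × List Char)) (s2 c2 : List Char)
    (hnd : '-' ∉ s2) (hO2 : s2 ≠ ['O']) (b : Bool)
    (iA : Int) (clA : Option (List Char)) (stA : Int) (resA : List (List Char × Int × Int))
    (opB : Option (List Char)) (ostB : Int) (resB : List (List Char × Int × Int))
    (hrun : pvRunA (g2.map fun p => renderLab p.1 p.2) iA clA stA resA =
      some (iA + g2.length, opB, ostB, resB)) :
    pvRunA (((g2 ++ [(s2, c2)]).map fun p => renderLab p.1 p.2)) iA clA stA resA =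
      (emitPendB s2 c2 b false (iA + g2.length) opB ostB resB).map
        fun q => (iA + g2.length + 1, q.1, q.2.1, q.2.2) := by
  rw [List.map_append, List.map_singleton, pvRunA_append, hrun]
  exact pvRunA_single_raw s2 c2 hnd hO2 b _ opB ostB resB

-- MAIN: fusing A's two phases equals B's single pass (on labels with nonempty tag parts).
-- Invariant: A is at the start of the currently-pending chunk (index iA, machine state
-- clA/stA/resA); B has processed the chunk's interior and holds its last element pending.
lemma pvMain : ∀ (labels : List (List Char)) (prev : Option (List Char))
    (g : List (List Char × List Char)) (iA : Int) (clA : Option (List Char)) (stA : Int)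
    (resA : List (List Char × Int × Int)) (pend : Option (List Char × List Char × Bool × Int))
    (iB : Int) (opB : Option (List Char)) (ostB : Int) (resB : List (List Char × Int × Int)),
    (∀ l ∈ labels, l.head? ≠ some '-') →
    (∀ p ∈ g, '-' ∉ p.1 ∧ p.1 ≠ ['O'] ∧ p.1 ≠ []) →
    ((g = [] ∧ (pend = none ∨ ∃ c2 pst pidx, pend = some (['O'], c2, pst, pidx)) ∧
        iB = iA ∧ opB = clA ∧ ostB = stA ∧ resB = resA) ∨
     (∃ g2 s2 c2, g = g2 ++ [(s2, c2)] ∧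
        pend = some (s2, c2, decide (g2 = []), iA + g2.length) ∧ iB = iA + g.length ∧
        pvRunA (g2.map fun p => renderLab p.1 p.2) iA clA stA resA =
          some (iA + g2.length, opB, ostB, resB))) →
    (chunkGoA labels prev (g.map fun p => renderLab p.1 p.2) []).bind
        (fun out => spanGoA out iA clA stA resA) =
      spanGoB labels prev pend iB opB ostB resB := by
  intro labels
  induction labels with
  | nil =>
    intro prev g iA clA stA resA pend iB opB ostB resB _ hok hlink
    rcases hlink with ⟨rfl, hpend, rfl, rfl, rfl, rfl⟩ | ⟨g2, s2, c2, rfl, rfl, hiB, hrun⟩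
    · rcases hpend with rfl | ⟨c2, pst, pidx, rfl⟩ <;>
        simp [chunkGoA, spanGoA, spanGoB, emitPendB, pvFlush]
    · have hokg2 : ∀ p ∈ g2, '-' ∉ p.1 :=
        fun p hp => (hok p (List.mem_append_left _ hp)).1
      have hO2 : s2 ≠ ['O'] := (hok (s2, c2) (by simp)).2.1
      have hne2 : s2 ≠ [] := (hok (s2, c2) (by simp)).2.2
      have hnd2 : '-' ∉ s2 := (hok (s2, c2) (by simp)).1
      have hne : (((g2 ++ [(s2, c2)]).map fun p => renderLab p.1 p.2)) ≠ [] := by simp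
      simp only [chunkGoA, spanGoB, if_neg hne, List.nil_append, Option.bind_some]
      rw [spanGoA_eq_runA, pvRunA_group g2 s2 c2 hokg2 _ _ _ _ _ _ _ hO2 hne2 hnd2 hrun]
      cases hemit : emitPendB s2 c2 (decide (g2 = [])) true (iA + g2.length) opB ostB resB with
      | none => simp
      | some tr =>
        obtain ⟨o1, st1, r1⟩ := tr
        subst hiB
        simp only [Option.map_some, pvFlush, List.length_append, List.length_singleton]
        push_cast
        ring_nf
  | cons l rest ih =>
    intro prev g iA clA stA resA pend iB opB ostB resB Hlab hok hlink
    have Hrest : ∀ l' ∈ rest, l'.head? ≠ some '-' :=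
      fun l' hl' => Hlab l' (List.mem_cons_of_mem _ hl')
    simp only [chunkGoA, spanGoB]
    cases hp : parseLab l with
    | none => rfl
    | some p =>
      obtain ⟨s0, c⟩ := p
      have hnd0 : '-' ∉ s0 := parseLab_nodash l s0 c hp
      have hne0 : s0 ≠ [] := parseLab_state_ne_nil l s0 c hp (Hlab l List.mem_cons_self)
      simp only []
      by_cases hO : (if s0 = ['I'] ∧ prev ≠ some c then ['B'] else s0) = ['O']
      · -- current label acts as 'O': close any pending chunk, besio gains an 'O'
        rw [hO]
        rcases hlink with ⟨rfl, hpend, rfl, rfl, rfl, rfl⟩ | ⟨g2, s2, c2, rfl, rfl, hiB, hrun⟩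
        · have hC : ¬(((['O'] : List Char) = ['B'] ∨ (['O'] : List Char) = ['O']) ∧
              (List.map (fun p => renderLab p.1 p.2) ([] : List (List Char × List Char))) ≠ []) := by
            simp
          rw [if_neg hC, if_neg hC, if_pos rfl]
          simp only [List.map_nil, List.nil_append]
          rw [chunkGoA_acc]
          have hIH := ih (some c) [] (iB + 1) opB ostB resB (some (['O'], c, false, iB))
            (iB + 1) opB ostB resB Hrest (by simp)
            (Or.inl ⟨rfl, Or.inr ⟨c, false, iB, rfl⟩, rfl, rfl, rfl, rfl⟩)
          simp only [List.map_nil] at hIH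
          have hbind : ((chunkGoA rest (some c) [] []).map fun out => [['O']] ++ out).bind
              (fun out => spanGoA out iB opB ostB resB) =
              (chunkGoA rest (some c) [] []).bind
                (fun out => spanGoA out (iB + 1) opB ostB resB) := by
            cases chunkGoA rest (some c) [] [] with
            | none => rfl
            | some out =>
              simp only [Option.map_some, Option.bind_some]
              rw [spanGoA_split, pvRunA_single_O]
          rcases hpend with rfl | ⟨c2, pst, pidx, rfl⟩ <;> exact hbind.trans hIH
        · subst hiB
          have hlen : iA + (((g2 ++ [(s2, c2)]).length : Nat) : Int) =
              iA + ((g2.length : Nat) : Int) + 1 := by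
            simp only [List.length_append, List.length_cons, List.length_nil]; push_cast; ring
          rw [hlen]
          have hokg2 : ∀ p ∈ g2, '-' ∉ p.1 :=
            fun p hp => (hok p (List.mem_append_left _ hp)).1
          have hO2 : s2 ≠ ['O'] := (hok (s2, c2) (by simp)).2.1
          have hne2 : s2 ≠ [] := (hok (s2, c2) (by simp)).2.2
          have hnd2 : '-' ∉ s2 := (hok (s2, c2) (by simp)).1
          have hC : (((['O'] : List Char) = ['B'] ∨ (['O'] : List Char) = ['O']) ∧
              (List.map (fun p => renderLab p.1 p.2) (g2 ++ [(s2, c2)])) ≠ []) :=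
            ⟨Or.inr rfl, by simp⟩
          rw [if_pos hC, if_pos hC, if_pos rfl]
          simp only [List.nil_append]
          rw [chunkGoA_acc]
          simp only [eq_self_iff_true, true_or, or_true, decide_true, ne_eq, not_true,
            decide_false, Bool.false_and, Bool.not_true, Bool.and_false, Bool.not_false,
            Bool.and_true, Bool.true_and]
          cases hemit : emitPendB s2 c2 (decide (g2 = [])) true (iA + ((g2.length : Nat) : Int))
              opB ostB resB with
          | none =>
            simp only [hemit]
            have hfun : ∀ out, spanGoA
                ((toBesio (List.map (fun p => renderLab p.1 p.2) (g2 ++ [(s2, c2)])) ++ [['O']]) ++ out)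
                iA clA stA resA = none := by
              intro out
              rw [List.append_assoc, spanGoA_split,
                pvRunA_group g2 s2 c2 hokg2 _ _ _ _ _ _ _ hO2 hne2 hnd2 hrun, hemit]
              rfl
            cases chunkGoA rest (some c) [] [] with
            | none => rfl
            | some out => simp only [Option.map_some, Option.bind_some]; exact hfun out
          | some tr =>
            obtain ⟨o1, st1, r1⟩ := tr
            simp only [hemit]
            have hIH := ih (some c) [] (iA + ((g2.length : Nat) : Int) + 1 + 1) o1 st1 r1
              (some (['O'], c, false, iA + ((g2.length : Nat) : Int) + 1))
              (iA + ((g2.length : Nat) : Int) + 1 + 1) o1 st1 r1 Hrest (by simp)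
              (Or.inl ⟨rfl, Or.inr ⟨c, false, _, rfl⟩, rfl, rfl, rfl, rfl⟩)
            simp only [List.map_nil] at hIH
            have hfun : ∀ out, spanGoA
                ((toBesio (List.map (fun p => renderLab p.1 p.2) (g2 ++ [(s2, c2)])) ++ [['O']]) ++ out)
                iA clA stA resA =
                spanGoA out (iA + ((g2.length : Nat) : Int) + 1 + 1) o1 st1 r1 := by
              intro out
              rw [List.append_assoc, spanGoA_split,
                pvRunA_group g2 s2 c2 hokg2 _ _ _ _ _ _ _ hO2 hne2 hnd2 hrun, hemit]
              simp only [Option.map_some]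
              rw [spanGoA_split, pvRunA_single_O]
            have hbind : ((chunkGoA rest (some c) [] []).map
                (fun out => (toBesio (List.map (fun p => renderLab p.1 p.2) (g2 ++ [(s2, c2)])) ++
                  [['O']]) ++ out)).bind (fun out => spanGoA out iA clA stA resA) =
                (chunkGoA rest (some c) [] []).bind
                  (fun out => spanGoA out (iA + ((g2.length : Nat) : Int) + 1 + 1) o1 st1 r1) := by
              cases chunkGoA rest (some c) [] [] with
              | none => rfl
              | some out =>
                simp only [Option.map_some, Option.bind_some]; exact hfun out
            exact hbind.trans hIH
      · by_cases hB : (if s0 = ['I'] ∧ prev ≠ some c then ['B'] else s0) = ['B']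
        · -- current label starts a fresh chunk
          rw [hB]
          rcases hlink with ⟨rfl, hpend, rfl, rfl, rfl, rfl⟩ | ⟨g2, s2, c2, rfl, rfl, hiB, hrun⟩
          · have hC : ¬(((['B'] : List Char) = ['B'] ∨ (['B'] : List Char) = ['O']) ∧
                (List.map (fun p => renderLab p.1 p.2) ([] : List (List Char × List Char))) ≠ []) := by
              simp
            rw [if_neg hC, if_neg hC, if_neg (by decide : ¬(['B'] : List Char) = ['O'])]
            simp only [List.map_nil, List.nil_append]
            have hIH := ih (some c) [(['B'], c)] iB opB ostB resB (some (['B'], c, true, iB))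
              (iB + 1) opB ostB resB Hrest (by simp)
              (Or.inr ⟨[], ['B'], c, rfl, by simp, by simp, by simp [pvRunA]⟩)
            simp only [List.map_cons, List.map_nil] at hIH
            rcases hpend with rfl | ⟨c2, pst, pidx, rfl⟩ <;> exact hIH
          · subst hiB
            have hlen : iA + (((g2 ++ [(s2, c2)]).length : Nat) : Int) =
                iA + ((g2.length : Nat) : Int) + 1 := by
              simp only [List.length_append, List.length_cons, List.length_nil]; push_cast; ring
            rw [hlen]
            have hokg2 : ∀ p ∈ g2, '-' ∉ p.1 :=
              fun p hp => (hok p (List.mem_append_left _ hp)).1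
            have hO2 : s2 ≠ ['O'] := (hok (s2, c2) (by simp)).2.1
            have hne2 : s2 ≠ [] := (hok (s2, c2) (by simp)).2.2
            have hnd2 : '-' ∉ s2 := (hok (s2, c2) (by simp)).1
            have hC : (((['B'] : List Char) = ['B'] ∨ (['B'] : List Char) = ['O']) ∧
                (List.map (fun p => renderLab p.1 p.2) (g2 ++ [(s2, c2)])) ≠ []) :=
              ⟨Or.inl rfl, by simp⟩
            rw [if_pos hC, if_pos hC, if_neg (by decide : ¬(['B'] : List Char) = ['O'])]
            simp only [List.nil_append]
            rw [chunkGoA_acc]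
            simp only [eq_self_iff_true, true_or, or_true, decide_true, ne_eq,
              show ((['B'] : List Char) = ['O']) ↔ False by decide, not_false_iff, not_true,
              decide_false, Bool.false_and, Bool.not_true, Bool.and_false, Bool.not_false,
              Bool.and_true, Bool.true_and]
            cases hemit : emitPendB s2 c2 (decide (g2 = [])) true (iA + ((g2.length : Nat) : Int))
                opB ostB resB with
            | none =>
              simp only [hemit]
              have hfun : ∀ out, spanGoA
                  (toBesio (List.map (fun p => renderLab p.1 p.2) (g2 ++ [(s2, c2)])) ++ out)
                  iA clA stA resA = none := by
                intro out
                rw [spanGoA_split, pvRunA_group g2 s2 c2 hokg2 _ _ _ _ _ _ _ hO2 hne2 hnd2 hrun,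
                  hemit]
                rfl
              cases chunkGoA rest (some c) [renderLab ['B'] c] [] with
              | none => rfl
              | some out => simp only [Option.map_some, Option.bind_some]; exact hfun out
            | some tr =>
              obtain ⟨o1, st1, r1⟩ := tr
              simp only [hemit]
              have hIH := ih (some c) [(['B'], c)] (iA + ((g2.length : Nat) : Int) + 1) o1 st1 r1
                (some (['B'], c, true, iA + ((g2.length : Nat) : Int) + 1))
                (iA + ((g2.length : Nat) : Int) + 1 + 1) o1 st1 r1 Hrest (by simp)
                (Or.inr ⟨[], ['B'], c, rfl, by simp, by simp, by simp [pvRunA]⟩)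
              simp only [List.map_cons, List.map_nil] at hIH
              have hfun : ∀ out, spanGoA
                  (toBesio (List.map (fun p => renderLab p.1 p.2) (g2 ++ [(s2, c2)])) ++ out)
                  iA clA stA resA =
                  spanGoA out (iA + ((g2.length : Nat) : Int) + 1) o1 st1 r1 := by
                intro out
                rw [spanGoA_split, pvRunA_group g2 s2 c2 hokg2 _ _ _ _ _ _ _ hO2 hne2 hnd2 hrun,
                  hemit]
                rfl
              have hbind : ((chunkGoA rest (some c) [renderLab ['B'] c] []).map
                  (fun out => toBesio (List.map (fun p => renderLab p.1 p.2) (g2 ++ [(s2, c2)])) ++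
                    out)).bind (fun out => spanGoA out iA clA stA resA) =
                  (chunkGoA rest (some c) [renderLab ['B'] c] []).bind
                    (fun out => spanGoA out (iA + ((g2.length : Nat) : Int) + 1) o1 st1 r1) := by
                cases chunkGoA rest (some c) [renderLab ['B'] c] [] with
                | none => rfl
                | some out =>
                  simp only [Option.map_some, Option.bind_some]; exact hfun out
              exact hbind.trans hIH
        · -- current label continues (or opens) the pending chunk: nothing is flushed
          have hnd : '-' ∉ (if s0 = ['I'] ∧ prev ≠ some c then ['B'] else s0) := by
            split_ifs
            · simp
            · exact hnd0
          have hne' : (if s0 = ['I'] ∧ prev ≠ some c then ['B'] else s0) ≠ [] := by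
            split_ifs
            · simp
            · exact hne0
          have hC : ¬((((if s0 = ['I'] ∧ prev ≠ some c then ['B'] else s0) = ['B'] ∨
              (if s0 = ['I'] ∧ prev ≠ some c then ['B'] else s0) = ['O']) ∧
              (List.map (fun p => renderLab p.1 p.2) g) ≠ [])) := by
            simp [hO, hB]
          rw [if_neg hC, if_neg hC, if_neg hO]
          have hend : decide ((if s0 = ['I'] ∧ prev ≠ some c then ['B'] else s0) = ['O'] ∨
              (if s0 = ['I'] ∧ prev ≠ some c then ['B'] else s0) = ['B']) = false := by
            simp [hO, hB]
          simp only [hend, Bool.not_false, Bool.and_true,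
            show decide ((if s0 = ['I'] ∧ prev ≠ some c then ['B'] else s0) ≠ ['O']) = true by
              simp [hO], Bool.true_and]
          rcases hlink with ⟨rfl, hpend, rfl, rfl, rfl, rfl⟩ | ⟨g2, s2, c2, rfl, rfl, hiB, hrun⟩
          · have hIH := ih (some c) [((if s0 = ['I'] ∧ prev ≠ some c then ['B'] else s0), c)]
              iB opB ostB resB
              (some ((if s0 = ['I'] ∧ prev ≠ some c then ['B'] else s0), c, true, iB))
              (iB + 1) opB ostB resB Hrest (by simp [hnd, hO, hne'])
              (Or.inr ⟨[], _, c, rfl, by simp, by simp, by simp [pvRunA]⟩)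
            simp only [List.map_cons, List.map_nil] at hIH
            rcases hpend with rfl | ⟨c2, pst, pidx, rfl⟩ <;>
              (simp only [List.map_nil, List.nil_append]; exact hIH)
          · subst hiB
            have hlen : iA + (((g2 ++ [(s2, c2)]).length : Nat) : Int) =
                iA + ((g2.length : Nat) : Int) + 1 := by
              simp only [List.length_append, List.length_cons, List.length_nil]; push_cast; ring
            rw [hlen]
            have hokg2 : ∀ p ∈ g2, '-' ∉ p.1 :=
              fun p hp => (hok p (List.mem_append_left _ hp)).1
            have hnd2 : '-' ∉ s2 := (hok (s2, c2) (by simp)).1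
            have hO2 : s2 ≠ ['O'] := (hok (s2, c2) (by simp)).2.1
            simp only [show decide (s2 ≠ ['O']) = true by simp [hO2], Bool.not_true, Bool.true_and,
              Bool.and_true]
            cases hemit : emitPendB s2 c2 (decide (g2 = [])) false (iA + ((g2.length : Nat) : Int))
                opB ostB resB with
            | none =>
              simp only [hemit]
              have hrunAll : pvRunA (List.map (fun p => renderLab p.1 p.2) (g2 ++ [(s2, c2)]))
                  iA clA stA resA = none := by
                rw [pvRunA_snoc_raw g2 s2 c2 hnd2 hO2 (decide (g2 = [])) _ _ _ _ _ _ _ hrun, hemit]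
                rfl
              cases hout : chunkGoA rest (some c)
                  (List.map (fun p => renderLab p.1 p.2) (g2 ++ [(s2, c2)]) ++
                    [renderLab (if s0 = ['I'] ∧ prev ≠ some c then ['B'] else s0) c]) [] with
              | none => rfl
              | some out =>
                simp only [Option.bind_some]
                have hpre := chunkGoA_prefix rest (some c) _ out hout
                rw [List.dropLast_concat] at hpre
                obtain ⟨tail, rfl⟩ := hpre
                rw [spanGoA_split, hrunAll]
            | some tr =>
              obtain ⟨o1, st1, r1⟩ := tr
              simp only [hemit]
              have hrunAll : pvRunA (List.map (fun p => renderLab p.1 p.2) (g2 ++ [(s2, c2)]))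
                  iA clA stA resA = some (iA + ((g2.length : Nat) : Int) + 1, o1, st1, r1) := by
                rw [pvRunA_snoc_raw g2 s2 c2 hnd2 hO2 (decide (g2 = [])) _ _ _ _ _ _ _ hrun, hemit]
                rfl
              have hIH := ih (some c)
                ((g2 ++ [(s2, c2)]) ++ [((if s0 = ['I'] ∧ prev ≠ some c then ['B'] else s0), c)])
                iA clA stA resA
                (some ((if s0 = ['I'] ∧ prev ≠ some c then ['B'] else s0), c, false,
                  iA + ((g2.length : Nat) : Int) + 1))
                (iA + ((g2.length : Nat) : Int) + 1 + 1) o1 st1 r1 Hrest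
                (by
                  intro p hp
                  rcases List.mem_append.mp hp with hp1 | hp2
                  · exact hok p hp1
                  · simp at hp2; subst hp2; exact ⟨hnd, hO, hne'⟩)
                (Or.inr ⟨g2 ++ [(s2, c2)], _, c, rfl,
                  by simp [hlen, add_assoc],
                  by simp only [List.length_append, List.length_cons, List.length_nil]; push_cast; ring,
                  by rw [hlen]; exact hrunAll⟩)
              simp only [List.map_append, List.map_cons, List.map_nil] at hIH ⊢
              exact hIH

-- ===== VERDICT (by name: the statement is the Claim_ definition above) =====
theorem labels_to_spans_spec : Claim_equal_labels_to_spans := by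
  intro labeling _ hpre
  unfold Spec_labels_to_spans labels_to_spans labels_to_spans_alt
  have Hlab : ∀ l ∈ labeling.map String.toList, l.head? ≠ some '-' := by
    intro l hl
    obtain ⟨s, hs, rfl⟩ := List.mem_map.mp hl
    exact hpre.2.1 s hs
  have h := pvMain (labeling.map String.toList) none [] 0 none 0 [] none 0 none 0 []
    Hlab (by simp) (Or.inl ⟨rfl, Or.inl rfl, rfl, rfl, rfl, rfl⟩)
  simp only [List.map_nil] at h
  rw [← h]
  cases chunkGoA (labeling.map String.toList) none [] [] with
  | none => rfl
  | some besio =>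
    simp only [Option.bind_some]
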